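-- pv_equiv track=rewrite | github.com/AGBAHOLOU/Webscraping | project-main/scrapy/price/price/spiders/micromania_spider.py | uniformize_name_and_category
-- ===== SOURCE A (Python) =====
-- def uniformize_name_and_category(name):
--     """Uniformise le nom des consoles et attribue la catégorie correspondante."""
--     name = name.lower()
--     categories = []
--     uniform_name = None
--
--     # Sony
--     if any(term in name for term in ["ps5", "playstation 5", "playstation5"]):
--         uniform_name = "PlayStation 5"
--         categories.append("Sony")
--     elif any(term in name for term in ["ps4", "playstation 4", "playstation4"]):
--         uniform_name = "PlayStation 4"
--         categories.append("Sony")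
--     elif any(term in name for term in ["ps3", "playstation 3", "playstation3"]):
--         uniform_name = "PlayStation 3"
--         categories.append("Sony")
--     elif any(term in name for term in ["ps2", "playstation 2", "playstation2"]):
--         uniform_name = "PlayStation 2"
--         categories.append("Sony")
--     elif any(term in name for term in ["ps1", "playstation 1", "playstation classic", "ps one"]):
--         uniform_name = "PlayStation 1"
--         categories.append("Sony")
--
--     # Microsoft
--     elif any(term in name for term in ["xbox series x", "xbox series s", "xbox series"]):
--         uniform_name = "Xbox Series X/S"
--         categories.append("Microsoft")
--     elif "xbox one" in name:
--         uniform_name = "Xbox One"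
--         categories.append("Microsoft")
--     elif "xbox 360" in name:
--         uniform_name = "Xbox 360"
--         categories.append("Microsoft")
--
--     # Nintendo
--     elif any(term in name for term in ["switch", "nintendo switch", "switch lite", "switch oled"]):
--         uniform_name = "Nintendo Switch"
--         categories.append("Nintendo")
--     elif any(term in name for term in ["wii", "nintendo wii", "wii u", "wii mini"]):
--         uniform_name = "Nintendo Wii"
--         categories.append("Nintendo")
--     elif any(term in name for term in ["gamecube", "nintendo gamecube"]):
--         uniform_name = "Nintendo GameCube"
--         categories.append("Nintendo")
--     elif any(term in name for term in ["nintendo 64", "n64"]):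
--         uniform_name = "Nintendo 64"
--         categories.append("Nintendo")
--     elif any(term in name for term in ["nes", "nintendo nes", "classic mini nes"]):
--         uniform_name = "Nintendo NES"
--         categories.append("Nintendo")
--
--     # Retrogaming
--     elif any(term in name for term in ["sega", "megadrive", "master system", "dreamcast", "saturn"]):
--         uniform_name = "Sega Consoles"
--         categories.append("Retrogaming")
--     elif any(term in name for term in ["atari", "atari flashback", "atari 2600"]):
--         uniform_name = "Atari Consoles"
--         categories.append("Retrogaming")
--     elif any(term in name for term in ["neo-geo", "snk neo-geo"]):
--         uniform_name = "Neo-Geo"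
--         categories.append("Retrogaming")
--
--     return uniform_name, categories
-- ===== SOURCE B (Python) =====
-- # B: instead of an ordered if/elif cascade of substring tests, sweep once over all
-- # start positions of the (lowercased) name, collect the rule index of every pattern
-- # that begins at some position, and render the smallest (= highest-priority) hit.
-- _PATTERNS = [
--     ("ps5", 0), ("playstation 5", 0), ("playstation5", 0),
--     ("ps4", 1), ("playstation 4", 1), ("playstation4", 1),
--     ("ps3", 2), ("playstation 3", 2), ("playstation3", 2),
--     ("ps2", 3), ("playstation 2", 3), ("playstation2", 3),
--     ("ps1", 4), ("playstation 1", 4), ("playstation classic", 4), ("ps one", 4),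
--     ("xbox series x", 5), ("xbox series s", 5), ("xbox series", 5),
--     ("xbox one", 6),
--     ("xbox 360", 7),
--     ("switch", 8), ("nintendo switch", 8), ("switch lite", 8), ("switch oled", 8),
--     ("wii", 9), ("nintendo wii", 9), ("wii u", 9), ("wii mini", 9),
--     ("gamecube", 10), ("nintendo gamecube", 10),
--     ("nintendo 64", 11), ("n64", 11),
--     ("nes", 12), ("nintendo nes", 12), ("classic mini nes", 12),
--     ("sega", 13), ("megadrive", 13), ("master system", 13), ("dreamcast", 13), ("saturn", 13),
--     ("atari", 14), ("atari flashback", 14), ("atari 2600", 14),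
--     ("neo-geo", 15), ("snk neo-geo", 15),
-- ]
--
-- _RESULTS = [
--     ("PlayStation 5", "Sony"), ("PlayStation 4", "Sony"), ("PlayStation 3", "Sony"),
--     ("PlayStation 2", "Sony"), ("PlayStation 1", "Sony"),
--     ("Xbox Series X/S", "Microsoft"), ("Xbox One", "Microsoft"), ("Xbox 360", "Microsoft"),
--     ("Nintendo Switch", "Nintendo"), ("Nintendo Wii", "Nintendo"),
--     ("Nintendo GameCube", "Nintendo"), ("Nintendo 64", "Nintendo"), ("Nintendo NES", "Nintendo"),
--     ("Sega Consoles", "Retrogaming"), ("Atari Consoles", "Retrogaming"), ("Neo-Geo", "Retrogaming"),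
-- ]
--
-- def uniformize_name_and_category(name):
--     name = name.lower()
--     hits = [k for i in range(len(name) + 1)
--               for pat, k in _PATTERNS if name.startswith(pat, i)]
--     if not hits:
--         return None, []
--     uniform_name, category = _RESULTS[min(hits)]
--     return uniform_name, [category]
-- ===== Notes on version B (the rewrite author's own statement) =====
-- stated objective: alternative
-- what changed: Replaced the ordered if/elif substring cascade with a single sweep over all start positions of the lowercased name that collects the rule index of every pattern beginning there (prefix tests), then renders the minimum collected index; no ordered first-match scan remains.
import Mathlib
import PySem

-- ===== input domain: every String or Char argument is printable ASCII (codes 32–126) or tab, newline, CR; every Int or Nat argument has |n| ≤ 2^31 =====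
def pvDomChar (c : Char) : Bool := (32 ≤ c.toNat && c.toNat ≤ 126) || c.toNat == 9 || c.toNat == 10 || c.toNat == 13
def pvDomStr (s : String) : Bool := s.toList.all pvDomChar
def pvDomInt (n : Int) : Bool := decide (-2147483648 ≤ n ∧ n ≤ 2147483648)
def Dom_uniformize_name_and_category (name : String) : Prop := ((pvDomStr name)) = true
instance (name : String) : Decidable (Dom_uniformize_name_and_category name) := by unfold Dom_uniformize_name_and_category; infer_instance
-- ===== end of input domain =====

-- B replaces A's ordered if/elif substring cascade by one sweep over all start positions
-- of the lowercased name, collecting the rule index of every pattern that begins there,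
-- then rendering the minimum collected index (an alternative algorithm; not claimed faster).

-- ===== PORT A =====
def uniformize_name_and_category (name : String) : Option String × List String :=
  let n := PySem.Str.lower name
  if ["ps5", "playstation 5", "playstation5"].any (fun t => PySem.Str.isIn t n) then
    (some "PlayStation 5", ["Sony"])
  else if ["ps4", "playstation 4", "playstation4"].any (fun t => PySem.Str.isIn t n) then
    (some "PlayStation 4", ["Sony"])
  else if ["ps3", "playstation 3", "playstation3"].any (fun t => PySem.Str.isIn t n) then
    (some "PlayStation 3", ["Sony"])
  else if ["ps2", "playstation 2", "playstation2"].any (fun t => PySem.Str.isIn t n) then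
    (some "PlayStation 2", ["Sony"])
  else if ["ps1", "playstation 1", "playstation classic", "ps one"].any (fun t => PySem.Str.isIn t n) then
    (some "PlayStation 1", ["Sony"])
  else if ["xbox series x", "xbox series s", "xbox series"].any (fun t => PySem.Str.isIn t n) then
    (some "Xbox Series X/S", ["Microsoft"])
  else if PySem.Str.isIn "xbox one" n then
    (some "Xbox One", ["Microsoft"])
  else if PySem.Str.isIn "xbox 360" n then
    (some "Xbox 360", ["Microsoft"])
  else if ["switch", "nintendo switch", "switch lite", "switch oled"].any (fun t => PySem.Str.isIn t n) then
    (some "Nintendo Switch", ["Nintendo"])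
  else if ["wii", "nintendo wii", "wii u", "wii mini"].any (fun t => PySem.Str.isIn t n) then
    (some "Nintendo Wii", ["Nintendo"])
  else if ["gamecube", "nintendo gamecube"].any (fun t => PySem.Str.isIn t n) then
    (some "Nintendo GameCube", ["Nintendo"])
  else if ["nintendo 64", "n64"].any (fun t => PySem.Str.isIn t n) then
    (some "Nintendo 64", ["Nintendo"])
  else if ["nes", "nintendo nes", "classic mini nes"].any (fun t => PySem.Str.isIn t n) then
    (some "Nintendo NES", ["Nintendo"])
  else if ["sega", "megadrive", "master system", "dreamcast", "saturn"].any (fun t => PySem.Str.isIn t n) then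
    (some "Sega Consoles", ["Retrogaming"])
  else if ["atari", "atari flashback", "atari 2600"].any (fun t => PySem.Str.isIn t n) then
    (some "Atari Consoles", ["Retrogaming"])
  else if ["neo-geo", "snk neo-geo"].any (fun t => PySem.Str.isIn t n) then
    (some "Neo-Geo", ["Retrogaming"])
  else
    (none, [])

-- ===== PORT B =====
def pvPatterns : List (String × Nat) :=
  [ ("ps5", 0), ("playstation 5", 0), ("playstation5", 0),
    ("ps4", 1), ("playstation 4", 1), ("playstation4", 1),
    ("ps3", 2), ("playstation 3", 2), ("playstation3", 2),
    ("ps2", 3), ("playstation 2", 3), ("playstation2", 3),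
    ("ps1", 4), ("playstation 1", 4), ("playstation classic", 4), ("ps one", 4),
    ("xbox series x", 5), ("xbox series s", 5), ("xbox series", 5),
    ("xbox one", 6),
    ("xbox 360", 7),
    ("switch", 8), ("nintendo switch", 8), ("switch lite", 8), ("switch oled", 8),
    ("wii", 9), ("nintendo wii", 9), ("wii u", 9), ("wii mini", 9),
    ("gamecube", 10), ("nintendo gamecube", 10),
    ("nintendo 64", 11), ("n64", 11),
    ("nes", 12), ("nintendo nes", 12), ("classic mini nes", 12),
    ("sega", 13), ("megadrive", 13), ("master system", 13), ("dreamcast", 13), ("saturn", 13),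
    ("atari", 14), ("atari flashback", 14), ("atari 2600", 14),
    ("neo-geo", 15), ("snk neo-geo", 15) ]

def pvResults : List (String × String) :=
  [ ("PlayStation 5", "Sony"), ("PlayStation 4", "Sony"), ("PlayStation 3", "Sony"),
    ("PlayStation 2", "Sony"), ("PlayStation 1", "Sony"),
    ("Xbox Series X/S", "Microsoft"), ("Xbox One", "Microsoft"), ("Xbox 360", "Microsoft"),
    ("Nintendo Switch", "Nintendo"), ("Nintendo Wii", "Nintendo"),
    ("Nintendo GameCube", "Nintendo"), ("Nintendo 64", "Nintendo"), ("Nintendo NES", "Nintendo"),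
    ("Sega Consoles", "Retrogaming"), ("Atari Consoles", "Retrogaming"), ("Neo-Geo", "Retrogaming") ]

-- name.startswith(pat, i) for 0 ≤ i is exactly 'pat is a prefix of name[i:]' — ported as
-- PySem.Chars.startswith on (n.drop i); exact on all inputs the comprehension produces.
def pvHits (n : List Char) : List Nat :=
  (PySem.List.pyRange 0 ((n.length : Int) + 1) 1).flatMap (fun i =>
    pvPatterns.filterMap (fun pk =>
      if PySem.Chars.startswith (n.drop i.toNat) pk.1.toList then some pk.2 else none))

def uniformize_name_and_category_alt (name : String) : Option String × List String :=
  let n := (PySem.Str.lower name).toList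
  match PySem.List.min? (pvHits n) (fun k => k) with
  | none => (none, [])
  | some b =>
    match pvResults[b]? with
    | some (u, c) => (some u, [c])
    | none => (none, [])  -- unreachable: every hit index is < 16 (Python would raise IndexError)

-- ===== PRECONDITION & SPEC =====
def Spec_uniformize_name_and_category (name : String) (out : Option String × List String) : Prop := out = uniformize_name_and_category_alt name
instance (name : String) (out : Option String × List String) : Decidable (Spec_uniformize_name_and_category name out) := by unfold Spec_uniformize_name_and_category; infer_instance

-- ===== CLAIM (what is proved, stated in full; the proofs are below) =====
def Claim_equal_uniformize_name_and_category : Prop := ∀ (name : String), Dom_uniformize_name_and_category name → Spec_uniformize_name_and_category name (uniformize_name_and_category name)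

-- ===== LEMMAS AND PROOFS =====

-- render an optional rule index against a result table (shape shared by B's port)
def pvRenderG (rs : List (String × String)) (o : Option Nat) : Option String × List String :=
  match o with
  | none => (none, [])
  | some b =>
    match rs[b]? with
    | some (u, c) => (some u, [c])
    | none => (none, [])

-- A's cascade, abstracted over its 16 conditions and results
def pvCascade : List Bool → List (String × String) → Option String × List String
  | b :: bs, r :: rs => if b then (some r.1, [r.2]) else pvCascade bs rs
  | _, _ => (none, [])

-- the 16 cascade conditions of A, as booleans over the lowercased character list
def pvBvec (n : List Char) : List Bool :=
  [ ["ps5", "playstation 5", "playstation5"].any (fun t => PySem.Chars.isIn t.toList n),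
    ["ps4", "playstation 4", "playstation4"].any (fun t => PySem.Chars.isIn t.toList n),
    ["ps3", "playstation 3", "playstation3"].any (fun t => PySem.Chars.isIn t.toList n),
    ["ps2", "playstation 2", "playstation2"].any (fun t => PySem.Chars.isIn t.toList n),
    ["ps1", "playstation 1", "playstation classic", "ps one"].any (fun t => PySem.Chars.isIn t.toList n),
    ["xbox series x", "xbox series s", "xbox series"].any (fun t => PySem.Chars.isIn t.toList n),
    ["xbox one"].any (fun t => PySem.Chars.isIn t.toList n),
    ["xbox 360"].any (fun t => PySem.Chars.isIn t.toList n),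
    ["switch", "nintendo switch", "switch lite", "switch oled"].any (fun t => PySem.Chars.isIn t.toList n),
    ["wii", "nintendo wii", "wii u", "wii mini"].any (fun t => PySem.Chars.isIn t.toList n),
    ["gamecube", "nintendo gamecube"].any (fun t => PySem.Chars.isIn t.toList n),
    ["nintendo 64", "n64"].any (fun t => PySem.Chars.isIn t.toList n),
    ["nes", "nintendo nes", "classic mini nes"].any (fun t => PySem.Chars.isIn t.toList n),
    ["sega", "megadrive", "master system", "dreamcast", "saturn"].any (fun t => PySem.Chars.isIn t.toList n),
    ["atari", "atari flashback", "atari 2600"].any (fun t => PySem.Chars.isIn t.toList n),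
    ["neo-geo", "snk neo-geo"].any (fun t => PySem.Chars.isIn t.toList n) ]

-- index of the first true entry
def pvFirstTrue : List Bool → Option Nat
  | [] => none
  | b :: rest => if b then some 0 else (pvFirstTrue rest).map (· + 1)

theorem pvFirstTrue_eq_none_iff (bs : List Bool) :
    pvFirstTrue bs = none ↔ ∀ j, bs.getD j false = false := by
  induction bs with
  | nil => simp [pvFirstTrue]
  | cons b rest ih =>
    cases b with
    | true =>
      simp only [pvFirstTrue]
      constructor
      · intro h; cases h
      · intro h; have := h 0; simp at this
    | false =>
      simp only [pvFirstTrue, if_neg Bool.false_ne_true, Option.map_eq_none_iff, ih]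
      constructor
      · intro h j; cases j with
        | zero => simp
        | succ j => rw [List.getD_cons_succ]; exact h j
      · intro h j; have := h (j + 1); rwa [List.getD_cons_succ] at this

theorem pvFirstTrue_eq_some (bs : List Bool) (m : Nat)
    (h1 : bs.getD m false = true) (h2 : ∀ j < m, bs.getD j false = false) :
    pvFirstTrue bs = some m := by
  induction bs generalizing m with
  | nil => simp at h1
  | cons b rest ih =>
    cases m with
    | zero =>
      rw [List.getD_cons_zero] at h1
      simp [pvFirstTrue, h1]
    | succ m =>
      have hb : b = false := by simpa using h2 0 (Nat.succ_pos m)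
      subst hb
      simp only [pvFirstTrue, if_neg Bool.false_ne_true]
      rw [ih m (by simpa using h1) (fun j hj => by simpa using h2 (j + 1) (by omega))]
      rfl

theorem pvCascade_eq_render (bs : List Bool) (rs : List (String × String))
    (h : bs.length = rs.length) :
    pvCascade bs rs = pvRenderG rs (pvFirstTrue bs) := by
  induction bs generalizing rs with
  | nil =>
    cases rs with
    | nil => rfl
    | cons r rs => simp at h
  | cons b bs ih =>
    cases rs with
    | nil => simp at h
    | cons r rs =>
      cases b with
      | true => rfl
      | false =>
        show pvCascade bs rs = pvRenderG (r :: rs) (Option.map (· + 1) (pvFirstTrue bs))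
        rw [ih rs (by simpa using h)]
        cases pvFirstTrue bs <;> rfl

theorem pvDrop_min (n : List Char) (j : Nat) : n.drop (min j n.length) = n.drop j := by
  by_cases h : j ≤ n.length
  · rw [Nat.min_eq_left h]
  · rw [Nat.min_eq_right (by omega), List.drop_eq_nil_of_le (le_refl _),
        List.drop_eq_nil_of_le (by omega)]

theorem mem_pvHits (n : List Char) (x : Nat) :
    x ∈ pvHits n ↔ ∃ pk ∈ pvPatterns, pk.2 = x ∧ PySem.Chars.isIn pk.1.toList n = true := by
  unfold pvHits
  simp only [List.mem_flatMap, List.mem_filterMap]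
  constructor
  · rintro ⟨i, hi, pk, hpk, hsome⟩
    by_cases hs : PySem.Chars.startswith (n.drop i.toNat) pk.1.toList = true
    · rw [if_pos hs] at hsome
      refine ⟨pk, hpk, by injection hsome, ?_⟩
      rw [← PySem.Chars.exists_prefix_drop_iff_isIn]
      exact ⟨i.toNat, (PySem.Chars.startswith_iff _ _).mp hs⟩
    · rw [if_neg hs] at hsome; cases hsome
  · rintro ⟨pk, hpk, hx, hin⟩
    obtain ⟨j, hj⟩ := (PySem.Chars.exists_prefix_drop_iff_isIn _ _).mpr hin
    refine ⟨((min j n.length : Nat) : Int), ?_, pk, hpk, ?_⟩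
    · rw [PySem.List.mem_pyRange_one]
      constructor
      · positivity
      · have : min j n.length ≤ n.length := Nat.min_le_right _ _
        omega
    · rw [if_pos ?_]
      · rw [hx]
      · rw [PySem.Chars.startswith_iff, Int.toNat_natCast, pvDrop_min]
        exact hj

theorem pvHits_bridge (n : List Char) (x : Nat) :
    x ∈ pvHits n ↔ x < 16 ∧ (pvBvec n).getD x false = true := by
  rw [mem_pvHits]
  constructor
  · rintro ⟨pk, hpk, hx, hin⟩
    subst hx
    simp only [pvPatterns, List.mem_cons, List.not_mem_nil, or_false] at hpk
    rcases hpk with rfl|rfl|rfl|rfl|rfl|rfl|rfl|rfl|rfl|rfl|rfl|rfl|rfl|rfl|rfl|rfl|rfl|rfl|rfl|rfl|rfl|rfl|rfl|rfl|rfl|rfl|rfl|rfl|rfl|rfl|rfl|rfl|rfl|rfl|rfl|rfl|rfl|rfl|rfl|rfl|rfl|rfl|rfl|rfl|rfl|rfl <;>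
      · refine ⟨by decide, ?_⟩
        simp [pvBvec]
        simp at hin
        tauto
  · rintro ⟨hx16, hb⟩
    interval_cases x <;>
      (obtain ⟨t, ht, hf⟩ := List.any_eq_true.mp hb
       refine ⟨(t, _), ?_, rfl, hf⟩
       fin_cases ht <;> decide)

theorem pvMin_eq_firstTrue (n : List Char) :
    PySem.List.min? (pvHits n) (fun k => k) = pvFirstTrue (pvBvec n) := by
  cases h : PySem.List.min? (pvHits n) (fun k => k) with
  | none =>
    have hnil : pvHits n = [] := (PySem.List.min?_eq_none_iff _ _).mp h
    symm
    rw [pvFirstTrue_eq_none_iff]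
    intro j
    by_contra hj
    simp only [Bool.not_eq_false] at hj
    by_cases hj16 : j < 16
    · have : j ∈ pvHits n := (pvHits_bridge n j).mpr ⟨hj16, hj⟩
      simp [hnil] at this
    · have hd : (pvBvec n).getD j false = false := by
        apply List.getD_eq_default
        have : (pvBvec n).length = 16 := rfl
        omega
      rw [hd] at hj; cases hj
  | some m =>
    have hmem : m ∈ pvHits n := PySem.List.min?_mem h
    have hmin : ∀ y ∈ pvHits n, m ≤ y := by
      intro y hy; exact PySem.List.min?_isMin h y hy
    obtain ⟨hm16, hmb⟩ := (pvHits_bridge n m).mp hmem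
    symm
    apply pvFirstTrue_eq_some _ _ hmb
    intro j hj
    by_contra hjb
    simp only [Bool.not_eq_false] at hjb
    have : j ∈ pvHits n := (pvHits_bridge n j).mpr ⟨by omega, hjb⟩
    have := hmin j this
    omega

theorem pvA_eq (name : String) :
    uniformize_name_and_category name =
      pvCascade (pvBvec (PySem.Str.lower name).toList) pvResults := by
  unfold uniformize_name_and_category
  simp only [pvCascade, pvBvec, pvResults, List.any_cons, List.any_nil, Bool.or_false,
    PySem.Str.isIn_eq]

theorem pvB_eq (name : String) :
    uniformize_name_and_category_alt name =
      pvRenderG pvResults (PySem.List.min? (pvHits (PySem.Str.lower name).toList) (fun k => k)) := by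
  unfold uniformize_name_and_category_alt pvRenderG
  dsimp only

-- ===== VERDICT (by name: the statement is the Claim_ definition above) =====
theorem uniformize_name_and_category_spec : Claim_equal_uniformize_name_and_category := by
  intro name _
  unfold Spec_uniformize_name_and_category
  rw [pvA_eq, pvB_eq, pvMin_eq_firstTrue, pvCascade_eq_render _ _ rfl]
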